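-- pv_equiv track=rewrite | github.com/pratyaynotfound/gine-edge-classification | utils.py | path2higlist
-- ===== SOURCE A (Python) =====
-- def path2higlist(p):
--     """Hierarchical path tokenization."""
--     l = []
--     p = (p or "").strip()
--     if not p:
--         return ["null"]
--     is_abs = p.startswith("/")
--     parts = [seg for seg in p.split("/") if seg]
--     for seg in parts:
--         if not l:
--             l.append("/" + seg if is_abs else seg)
--         else:
--             l.append(l[-1] + "/" + seg)
--     return l
-- ===== SOURCE B (Python) =====
-- def path2higlist(p):
--     """Hierarchical path tokenization."""
--     p = (p or "").strip()
--     if not p: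
--         return ["null"]
--     prefix = "/" if p.startswith("/") else ""
--     parts = [seg for seg in p.split("/") if seg]
--     return [prefix + "/".join(parts[:i + 1]) for i in range(len(parts))]
-- ===== Notes on version B (the rewrite author's own statement) =====
-- stated objective: simpler
-- what changed: Replaces the running-accumulator loop that extends the previous list element with each new segment by a direct comprehension building each cumulative prefix independently as the slash-join of the slice parts[:i+1], with the leading slash prepended when the path is absolute.
import Mathlib
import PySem

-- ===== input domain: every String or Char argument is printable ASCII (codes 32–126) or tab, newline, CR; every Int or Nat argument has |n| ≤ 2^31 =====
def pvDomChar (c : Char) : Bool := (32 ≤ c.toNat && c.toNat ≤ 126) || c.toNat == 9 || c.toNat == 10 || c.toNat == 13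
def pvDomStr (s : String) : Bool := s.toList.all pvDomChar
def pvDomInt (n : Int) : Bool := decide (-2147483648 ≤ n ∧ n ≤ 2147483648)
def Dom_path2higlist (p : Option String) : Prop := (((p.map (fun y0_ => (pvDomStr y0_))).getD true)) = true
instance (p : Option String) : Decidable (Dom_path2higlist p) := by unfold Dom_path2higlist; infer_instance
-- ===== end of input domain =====

-- B replaces A's running accumulator (l[-1] + "/" + seg) with a direct comprehension
-- building each cumulative prefix from a slice of the segment list; objective: simpler.

-- ===== PORT A =====
-- A's loop: if not l: append('/'+seg if is_abs else seg) else: append(l[-1]+'/'+seg)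
def path2higlist (p : Option String) : List String :=
  let cs := PySem.Chars.strip (p.getD "").toList
  if cs = [] then ["null"]
  else
    let is_abs := PySem.Chars.startswith cs ['/']
    let parts := (PySem.Chars.splitOn cs ['/']).filter (· ≠ [])
    (parts.foldl (fun l seg =>
      if l = [] then l ++ [if is_abs then '/' :: seg else seg]
      else l ++ [PySem.List.pyGetD l (-1) [] ++ '/' :: seg]) []).map String.ofList

-- ===== PORT B =====
-- B's comprehension: [prefix + "/".join(parts[:i+1]) for i in range(len(parts))]
def path2higlist_alt (p : Option String) : List String :=
  let cs := PySem.Chars.strip (p.getD "").toList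
  if cs = [] then ["null"]
  else
    let pre := if PySem.Chars.startswith cs ['/'] then ['/'] else ([] : List Char)
    let parts := (PySem.Chars.splitOn cs ['/']).filter (· ≠ [])
    ((PySem.List.pyRange 0 (parts.length : Int) 1).map (fun i =>
      pre ++ PySem.Chars.join ['/'] (PySem.List.slice parts none (some (i + 1))))).map String.ofList

-- ===== PRECONDITION & SPEC =====
def Spec_path2higlist (p : Option String) (out : List String) : Prop := out = path2higlist_alt p
instance (p : Option String) (out : List String) : Decidable (Spec_path2higlist p out) := by unfold Spec_path2higlist; infer_instance

-- ===== CLAIM (what is proved, stated in full; the proofs are below) =====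
def Claim_equal_path2higlist : Prop := ∀ (p : Option String), Dom_path2higlist p → Spec_path2higlist p (path2higlist p)

-- ===== LEMMAS AND PROOFS =====

-- cumulative list from last value a over xs
def cumul (a : List Char) : List (List Char) → List (List Char)
  | [] => []
  | y :: ys => (a ++ '/' :: y) :: cumul (a ++ '/' :: y) ys

-- "/".join(x :: t) spelled as x followed by "/"-prefixed segments
theorem join_slash_cons (x : List Char) (t : List (List Char)) :
    PySem.Chars.join ['/'] (x :: t) = x ++ t.flatMap (fun s => '/' :: s) := by
  induction t generalizing x with
  | nil => simp [PySem.Chars.join_singleton]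
  | cons y ys ih =>
      rw [PySem.Chars.join_cons_cons, ih y]
      simp

-- A's tail loop (acc nonempty, last element a) appends cumulative extensions of a
theorem foldA_eq_cumul (is_abs : Bool) (xs : List (List Char)) (acc : List (List Char)) (a : List Char)
    (hne : acc ≠ []) (hlast : PySem.List.pyGetD acc (-1) [] = a) :
    xs.foldl (fun l seg =>
      if l = [] then l ++ [if is_abs then '/' :: seg else seg]
      else l ++ [PySem.List.pyGetD l (-1) [] ++ '/' :: seg]) acc = acc ++ cumul a xs := by
  induction xs generalizing acc a with
  | nil => simp [cumul]
  | cons y ys ih =>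
      simp only [List.foldl_cons, if_neg hne, hlast, cumul]
      rw [ih (acc ++ [a ++ '/' :: y]) (a ++ '/' :: y) (by simp)
          (by rw [PySem.List.pyGetD_neg_one_append_singleton])]
      simp

theorem cumul_eq_map (a : List Char) (xs : List (List Char)) :
    cumul a xs = (List.range xs.length).map
      (fun i => a ++ (xs.take (i + 1)).flatMap (fun s => '/' :: s)) := by
  induction xs generalizing a with
  | nil => simp [cumul]
  | cons y ys ih =>
      simp only [cumul, ih (a ++ '/' :: y), List.length_cons, List.range_succ_eq_map,
        List.map_cons, List.map_map]
      congr 1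
      · simp
      · apply List.map_congr_left
        intro i _
        simp [Function.comp, List.take_succ_cons]

theorem pyRange_len_map {β : Type} (n : Nat) (f : Int → β) :
    (PySem.List.pyRange 0 (n : Int) 1).map f = (List.range n).map (fun k => f (Int.ofNat k)) := by
  rw [PySem.List.pyRange_one, List.map_map]
  have h : ((n : Int) - 0).toNat = n := by omega
  rw [h]
  apply List.map_congr_left
  intro k _
  simp

-- the whole loop of A equals B's comprehension, for any is_abs flag and segment list
theorem core (is_abs : Bool) (parts : List (List Char)) :
    parts.foldl (fun l seg =>
      if l = [] then l ++ [if is_abs then '/' :: seg else seg]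
      else l ++ [PySem.List.pyGetD l (-1) [] ++ '/' :: seg]) [] =
    (PySem.List.pyRange 0 (parts.length : Int) 1).map (fun i =>
      (if is_abs then ['/'] else []) ++
        PySem.Chars.join ['/'] (PySem.List.slice parts none (some (i + 1)))) := by
  rw [pyRange_len_map]
  have hslice : ∀ (k : Nat), PySem.List.slice parts none (some ((k : Int) + 1)) = parts.take (k + 1) := by
    intro k
    have : ((k : Int) + 1) = ((k + 1 : Nat) : Int) := by push_cast; ring
    rw [this, PySem.List.slice_to_natCast]
  simp only [Int.ofNat_eq_natCast, hslice]
  cases parts with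
  | nil => simp
  | cons x xs =>
      have hfirst : (if is_abs then '/' :: x else x) = (if is_abs then ['/'] else []) ++ x := by
        cases is_abs <;> simp
      have hlast : PySem.List.pyGetD [(if is_abs then ['/'] else []) ++ x] (-1) ([] : List Char)
          = (if is_abs then ['/'] else []) ++ x := by
        simpa using PySem.List.pyGetD_neg_one_append_singleton
          (xs := ([] : List (List Char))) (x := (if is_abs then ['/'] else []) ++ x) (d := [])
      rw [List.foldl_cons, if_pos rfl, List.nil_append, hfirst,
        foldA_eq_cumul is_abs xs _ _ (by simp) hlast, cumul_eq_map]
      simp only [List.length_cons, List.range_succ_eq_map, List.map_cons, List.map_map,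
        List.singleton_append]
      congr 1
      · simp [PySem.Chars.join_singleton]
      · apply List.map_congr_left
        intro i _
        simp only [Function.comp, List.take_succ_cons, join_slash_cons]
        simp

-- ===== VERDICT (by name: the statement is the Claim_ definition above) =====
theorem path2higlist_spec : Claim_equal_path2higlist := by
  intro p _
  unfold Spec_path2higlist path2higlist path2higlist_alt
  by_cases h : PySem.Chars.strip (p.getD "").toList = []
  · simp [h]
  · dsimp only
    rw [if_neg h, if_neg h, core]
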